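-- pv_equiv track=rewrite | github.com/ftiasch/acm-icpc | project-euler/p202.py | dfs
-- ===== SOURCE A (Python) =====
-- def dfs(m, primes, index, mu, d):
--     if index < len(primes):
--         return dfs(m, primes, index + 1, mu, d) + dfs(m, primes, index + 1, -mu, d * primes[index])
--     else:
--         result, md = 0, m // d
--         for r in range(3):
--             if r <= md and (r * d - 2 * m) % 3 == 0:
--                 result += (md - r) // 3 + 1
--         return mu * result
-- ===== SOURCE B (Python) =====
-- def dfs(m, primes, index, mu, d):
--     # Build the (divisor, sign) table iteratively, then one flat summing pass.
--     pairs = [(d, mu)]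
--     for i in range(index, len(primes)):
--         p = primes[i]
--         pairs += [(dd * p, -mm) for (dd, mm) in pairs]
--     total = 0
--     for dd, mm in pairs:
--         md = m // dd
--         for r in range(3):
--             if r <= md and (r * dd - 2 * m) % 3 == 0:
--                 total += mm * ((md - r) // 3 + 1)
--     return total
-- ===== Notes on version B (the rewrite author's own statement) =====
-- stated objective: alternative
-- what changed: Replaces A's binary recursion over the prime list with an iterative build of the full (divisor, sign) table followed by one flat summing pass over the table.
import Mathlib
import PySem

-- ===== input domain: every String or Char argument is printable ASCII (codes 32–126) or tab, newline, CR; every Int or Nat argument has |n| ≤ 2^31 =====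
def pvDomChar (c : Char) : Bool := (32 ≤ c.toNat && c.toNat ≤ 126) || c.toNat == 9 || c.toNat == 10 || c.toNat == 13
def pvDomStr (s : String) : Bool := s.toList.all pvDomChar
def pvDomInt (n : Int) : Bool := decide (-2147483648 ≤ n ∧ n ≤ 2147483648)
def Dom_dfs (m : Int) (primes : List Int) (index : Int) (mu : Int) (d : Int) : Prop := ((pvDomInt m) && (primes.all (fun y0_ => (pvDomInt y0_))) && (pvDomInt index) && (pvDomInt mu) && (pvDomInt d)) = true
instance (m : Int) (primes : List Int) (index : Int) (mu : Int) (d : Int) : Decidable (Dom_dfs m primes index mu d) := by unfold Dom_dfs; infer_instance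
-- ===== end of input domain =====

-- B replaces A's recursive inclusion-exclusion tree by an iterative (divisor, sign) table build
-- followed by one flat summing pass (objective: alternative decomposition, same cost).

-- ===== PORT A =====
-- the 'for r in range(3)' leaf loop of A, literally
def dfsLeafLoop (m : Int) (d : Int) (md : Int) : Int :=
  (PySem.List.pyRange 0 3 1).foldl
    (fun result r =>
      if r ≤ md ∧ PySem.Int.mod (r * d - 2 * m) 3 = 0 then
        result + (PySem.Int.floordiv (md - r) 3 + 1)
      else result) 0

def dfs (m : Int) (primes : List Int) (index : Int) (mu : Int) (d : Int) : Int :=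
  if _h : index < (primes.length : Int) then
    dfs m primes (index + 1) mu d +
      dfs m primes (index + 1) (-mu) (d * PySem.List.pyGetD primes index 0)
  else
    mu * dfsLeafLoop m d (PySem.Int.floordiv m d)
termination_by ((primes.length : Int) - index).toNat
decreasing_by all_goals omega

-- ===== PORT B =====
-- one iteration of B's table-building loop: pairs += [(dd*p, -mm) for (dd, mm) in pairs]
def altStep (primes : List Int) (pairs : List (Int × Int)) (i : Int) : List (Int × Int) :=
  let p := PySem.List.pyGetD primes i 0
  pairs ++ pairs.map (fun q => (q.1 * p, -q.2))

-- one iteration of B's summing pass over a (dd, mm) pair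
def altInner (m : Int) (total : Int) (q : Int × Int) : Int :=
  let md := PySem.Int.floordiv m q.1
  (PySem.List.pyRange 0 3 1).foldl
    (fun total r =>
      if r ≤ md ∧ PySem.Int.mod (r * q.1 - 2 * m) 3 = 0 then
        total + q.2 * (PySem.Int.floordiv (md - r) 3 + 1)
      else total) total

def dfs_alt (m : Int) (primes : List Int) (index : Int) (mu : Int) (d : Int) : Int :=
  (((PySem.List.pyRange index (primes.length : Int) 1).foldl (altStep primes) [(d, mu)]).foldl
    (altInner m) 0)

-- ===== PRECONDITION & SPEC =====
-- Pre_ excludes exactly the inputs where Python A raises: index below -len(primes)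
-- (IndexError on primes[index]) and inputs where some leaf divisor is 0
-- (d == 0, or a 0 among the primes the recursion multiplies in: ZeroDivisionError).
def Pre_dfs (m : Int) (primes : List Int) (index : Int) (mu : Int) (d : Int) : Prop :=
  d ≠ 0 ∧ -(primes.length : Int) ≤ index ∧
    (index < 0 → (0 : Int) ∉ primes) ∧
    (0 ≤ index → (0 : Int) ∉ primes.drop index.toNat)
instance (m : Int) (primes : List Int) (index : Int) (mu : Int) (d : Int) : Decidable (Pre_dfs m primes index mu d) := by unfold Pre_dfs; infer_instance

def pvWitness_dfs : Int × List Int × Int × Int × Int := (10, [2, 3], 0, 1, 1)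

def Spec_dfs (m : Int) (primes : List Int) (index : Int) (mu : Int) (d : Int) (out : Int) : Prop := out = dfs_alt m primes index mu d
instance (m : Int) (primes : List Int) (index : Int) (mu : Int) (d : Int) (out : Int) : Decidable (Spec_dfs m primes index mu d out) := by unfold Spec_dfs; infer_instance

-- ===== CLAIM (what is proved, stated in full; the proofs are below) =====
def Claim_equal_dfs : Prop := ∀ (m : Int) (primes : List Int) (index : Int) (mu : Int) (d : Int), Dom_dfs m primes index mu d → Pre_dfs m primes index mu d → Spec_dfs m primes index mu d (dfs m primes index mu d)

-- ===== LEMMAS AND PROOFS =====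

-- A's recursion tree, abstracted over the list of indices still to process
def Tfun (m : Int) (primes : List Int) : List Int → Int × Int → Int
  | [], q => altInner m 0 q
  | i :: r, q =>
      Tfun m primes r q + Tfun m primes r (q.1 * PySem.List.pyGetD primes i 0, -q.2)

theorem pyRange03 : PySem.List.pyRange 0 3 1 = [0, 1, 2] := by decide

theorem altInner_shift (m t : Int) (q : Int × Int) :
    altInner m t q = t + altInner m 0 q := by
  simp only [altInner, pyRange03, List.foldl]
  split_ifs <;> ring

theorem leaf_eq (m d mu : Int) :
    mu * dfsLeafLoop m d (PySem.Int.floordiv m d) = altInner m 0 (d, mu) := by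
  simp only [dfsLeafLoop, altInner, pyRange03, List.foldl]
  split_ifs <;> ring

theorem foldl_altInner_eq_sum (m : Int) (ps : List (Int × Int)) (t : Int) :
    ps.foldl (altInner m) t = t + (ps.map (fun q => altInner m 0 q)).sum := by
  induction ps generalizing t with
  | nil => simp
  | cons q ps ih =>
      simp only [List.foldl, List.map, List.sum_cons]
      rw [ih, altInner_shift]
      ring

theorem dfs_eq_Tfun (m : Int) (primes : List Int) (index mu d : Int) :
    dfs m primes index mu d
      = Tfun m primes (PySem.List.pyRange index (primes.length : Int) 1) (d, mu) := by
  by_cases h : index < (primes.length : Int)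
  · rw [PySem.List.pyRange_one_cons h]
    rw [dfs]
    simp only [h, dif_pos]
    rw [dfs_eq_Tfun m primes (index + 1) mu d,
        dfs_eq_Tfun m primes (index + 1) (-mu) (d * PySem.List.pyGetD primes index 0)]
    rfl
  · rw [PySem.List.pyRange_one_eq_nil (by omega)]
    rw [dfs]
    simp only [h, dif_neg, not_false_iff]
    exact leaf_eq m d mu
termination_by ((primes.length : Int) - index).toNat
decreasing_by all_goals omega

theorem foldl_altStep_sum (m : Int) (primes : List Int) (r : List Int)
    (ps : List (Int × Int)) :
    ((r.foldl (altStep primes) ps).map (fun q => altInner m 0 q)).sum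
      = (ps.map (Tfun m primes r)).sum := by
  induction r generalizing ps with
  | nil => rfl
  | cons i r ih =>
      simp only [List.foldl]
      rw [ih]
      simp only [altStep, List.map_append, List.sum_append, List.map_map]
      have : ∀ qs : List (Int × Int),
          (qs.map (Tfun m primes r)).sum
            + (qs.map (Tfun m primes r ∘ fun q => (q.1 * PySem.List.pyGetD primes i 0, -q.2))).sum
            = (qs.map (Tfun m primes (i :: r))).sum := by
        intro qs
        induction qs with
        | nil => simp
        | cons q qs ihq =>
            simp only [List.map, List.sum_cons, Function.comp] at *
            rw [← ihq]
            show _ = Tfun m primes r q + Tfun m primes r _ + _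
            ring
      exact this ps

-- ===== VERDICT (by name: the statement is the Claim_ definition above) =====
theorem dfs_spec : Claim_equal_dfs := by
  intro m primes index mu d _ _
  show dfs m primes index mu d = dfs_alt m primes index mu d
  rw [dfs_eq_Tfun, dfs_alt, foldl_altInner_eq_sum, foldl_altStep_sum]
  simp
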